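-- pv_equiv track=rewrite | github.com/yunachooi/algo-practice-hub | Programmers/Lv 0/안전지대.py | solution
-- ===== SOURCE A (Python) =====
-- def solution(board):
--     move = [(-1, 0), (1, 0), (0, -1), (0, 1),
--            (-1, -1), (-1, 1), (1, -1), (1, 1)]
--
--     for i in range(len(board)):
--         for j in range(len(board)):
--             if board[i][j] == 1:
--                 for dx, dy in move:
--                     x, y = i + dx, j + dy
--
--                     if x not in range(len(board)):
--                         continue
--                     if y not in range(len(board)):
--                         continue
--                     if board[x][y] == 1:
--                         continue
--                     board[x][y] = -1
--
--     return sum([1 for i in range(len(board)) for j in range(len(board)) if board[i][j] == 0])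
-- ===== SOURCE B (Python) =====
-- def solution(board):
--     n = len(board)
--     safe = 0
--     for i in range(n):
--         for j in range(n):
--             if board[i][j] == 0 and not any(
--                 0 <= i + dx < n and 0 <= j + dy < n and board[i + dx][j + dy] == 1
--                 for dx in (-1, 0, 1) for dy in (-1, 0, 1) if (dx, dy) != (0, 0)
--             ):
--                 safe += 1
--     return safe
-- ===== Notes on version B (the rewrite author's own statement) =====
-- stated objective: simpler
-- what changed: B replaces A's two passes (mutate the board by spreading -1 from every bomb, then recount zeros) with one pure cell-centric pass that counts cells equal to 0 having no bomb among their 8 in-range neighbours; B does not mutate its argument (the equivalence is about the return value).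
import Mathlib
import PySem

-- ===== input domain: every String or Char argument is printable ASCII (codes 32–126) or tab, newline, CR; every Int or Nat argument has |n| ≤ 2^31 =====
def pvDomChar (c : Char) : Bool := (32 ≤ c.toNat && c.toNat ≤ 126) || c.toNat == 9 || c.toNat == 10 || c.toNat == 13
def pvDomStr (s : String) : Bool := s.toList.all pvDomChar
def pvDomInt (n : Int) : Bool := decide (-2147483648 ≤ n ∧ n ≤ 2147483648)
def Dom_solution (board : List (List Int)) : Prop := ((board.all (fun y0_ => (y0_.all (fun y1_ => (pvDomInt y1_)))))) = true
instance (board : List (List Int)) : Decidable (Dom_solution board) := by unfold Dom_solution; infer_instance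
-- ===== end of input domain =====

-- B fuses A's two passes into one pure cell-centric scan (count cells that are 0 with no bomb
-- neighbour) and, unlike A, does not mutate its argument; the equivalence is about the return value.

-- ===== PORT A =====
-- board[i][j]; under Pre_solution every access A performs is in range, getD 0 only totalizes
def pvGet2 (b : List (List Int)) (x y : Int) : Int :=
  (((PySem.List.pyGet? b x).bind (fun r => PySem.List.pyGet? r y)).getD 0)

-- board[x][y] = v (x, y guaranteed in range at every call site of A)
def pvSet2 (b : List (List Int)) (x y v : Int) : List (List Int) :=
  match b[x.toNat]? with
  | some row => b.set x.toNat (row.set y.toNat v)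
  | none => b

def pvMove : List (Int × Int) :=
  [(-1, 0), (1, 0), (0, -1), (0, 1), (-1, -1), (-1, 1), (1, -1), (1, 1)]

-- body of A's `for dx, dy in move` loop
def pvStep (n i j : Nat) (b : List (List Int)) (d : Int × Int) : List (List Int) :=
  let x : Int := (i : Int) + d.1
  let y : Int := (j : Int) + d.2
  if ¬ (0 ≤ x ∧ x < (n : Int)) then b
  else if ¬ (0 ≤ y ∧ y < (n : Int)) then b
  else if pvGet2 b x y = 1 then b
  else pvSet2 b x y (-1)

-- body of A's `for j in range(len(board))` loop
def pvMarkFrom (n : Nat) (b : List (List Int)) (i j : Nat) : List (List Int) :=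
  if pvGet2 b (i : Int) (j : Int) = 1 then pvMove.foldl (pvStep n i j) b else b

def solution (board : List (List Int)) : Int :=
  let n := board.length
  let b := (List.range n).foldl
    (fun b i => (List.range n).foldl (fun b j => pvMarkFrom n b i j) b) board
  (List.range n).foldl
    (fun s (i : Nat) => (List.range n).foldl
      (fun s (j : Nat) => if pvGet2 b (i : Int) (j : Int) = 0 then s + 1 else s) s) (0 : Int)

-- ===== PORT B =====
def pvDs : List Int := [-1, 0, 1]

-- `any(... for dx in (-1,0,1) for dy in (-1,0,1) if (dx,dy) != (0,0))`
def pvHasBombNbr (board : List (List Int)) (n i j : Nat) : Bool :=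
  pvDs.any fun dx => pvDs.any fun dy =>
    decide (¬ (dx = 0 ∧ dy = 0)) &&
    decide (0 ≤ (i : Int) + dx ∧ (i : Int) + dx < (n : Int) ∧
            0 ≤ (j : Int) + dy ∧ (j : Int) + dy < (n : Int)) &&
    decide (pvGet2 board ((i : Int) + dx) ((j : Int) + dy) = 1)

def solution_alt (board : List (List Int)) : Int :=
  let n := board.length
  (List.range n).foldl
    (fun s (i : Nat) => (List.range n).foldl
      (fun s (j : Nat) =>
        if pvGet2 board (i : Int) (j : Int) = 0 ∧ ¬ pvHasBombNbr board n i j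
        then s + 1 else s) s) (0 : Int)

-- ===== PRECONDITION & SPEC =====
-- A indexes every row at all columns 0..len(board)-1: a row shorter than len(board) makes A
-- raise IndexError; Pre_ excludes exactly those boards (A returns normally on all others).
def Pre_solution (board : List (List Int)) : Prop :=
  ∀ row ∈ board, board.length ≤ row.length
instance (board : List (List Int)) : Decidable (Pre_solution board) := by
  unfold Pre_solution; infer_instance

def pvWitness_solution : List (List Int) := [[1, 0], [0, 0]]

def Spec_solution (board : List (List Int)) (out : Int) : Prop := out = solution_alt board
instance (board : List (List Int)) (out : Int) : Decidable (Spec_solution board out) := by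
  unfold Spec_solution; infer_instance

-- ===== CLAIM (what is proved, stated in full; the proofs are below) =====
def Claim_equal_solution : Prop :=
  ∀ (board : List (List Int)), Dom_solution board → Pre_solution board →
    Spec_solution board (solution board)

-- ===== LEMMAS AND PROOFS =====

-- Nat-indexed cell read, used only in the proofs
def gN (b : List (List Int)) (x y : Nat) : Int :=
  ((b[x]?).bind (fun r => r[y]?)).getD 0

-- the list of all (i, j) the outer double loop visits, in order
def pvPairs (n : Nat) : List (Nat × Nat) :=
  (List.range n).flatMap fun i => (List.range n).map fun j => (i, j)

-- (x, y) is a neighbour (through a delta of ds) of the bomb at (i, j)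
def pvNbr (i j : Nat) (ds : List (Int × Int)) (x y : Int) : Prop :=
  ∃ d ∈ ds, x = (i : Int) + d.1 ∧ y = (j : Int) + d.2

-- (x, y) is a neighbour of some already-processed bomb
def pvMarked (board : List (List Int)) (done : List (Nat × Nat)) (x y : Int) : Prop :=
  ∃ p ∈ done, pvGet2 board (p.1 : Int) (p.2 : Int) = 1 ∧ pvNbr p.1 p.2 pvMove x y

def pvShape (board b : List (List Int)) : Prop :=
  b.length = board.length ∧
  ∀ x : Nat, (b[x]?).map List.length = (board[x]?).map List.length

-- the loop invariant of A's marking pass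
def pvInv (board : List (List Int)) (P : Int → Int → Prop) (b : List (List Int)) : Prop :=
  pvShape board b ∧
  ∀ x y : Int, 0 ≤ x → x < (board.length : Int) → 0 ≤ y → y < (board.length : Int) →
    (pvGet2 board x y ≠ 1 ∧ P x y → pvGet2 b x y = -1) ∧
    (¬ (pvGet2 board x y ≠ 1 ∧ P x y) → pvGet2 b x y = pvGet2 board x y)

theorem gN_coe (b : List (List Int)) (x y : Nat) :
    pvGet2 b (x : Int) (y : Int) = gN b x y := by
  simp [pvGet2, gN]

theorem gN_int (b : List (List Int)) (x y : Int) (hx : 0 ≤ x) (hy : 0 ≤ y) :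
    pvGet2 b x y = gN b x.toNat y.toNat := by
  rw [← gN_coe, Int.toNat_of_nonneg hx, Int.toNat_of_nonneg hy]

theorem pvSet2_eq (b : List (List Int)) (x y : Nat) (v : Int) (row : List Int)
    (h : b[x]? = some row) :
    pvSet2 b (x : Int) (y : Int) v = b.set x (row.set y v) := by
  simp [pvSet2, h]

theorem gN_set (b : List (List Int)) (x y x' y' : Nat) (v : Int) (row : List Int)
    (h : b[x]? = some row) (hy : y < row.length) :
    gN (pvSet2 b (x : Int) (y : Int) v) x' y' =
      if x' = x ∧ y' = y then v else gN b x' y' := by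
  have hx : x < b.length := by
    by_contra hc
    rw [List.getElem?_eq_none (by omega : b.length ≤ x)] at h
    simp at h
  rw [pvSet2_eq b x y v row h]
  by_cases h1 : x' = x
  · subst h1
    have h2 : (b.set x' (row.set y v))[x']? = some (row.set y v) := by
      simp [hx]
    by_cases h3 : y' = y
    · subst h3
      simp [gN, h2, List.getElem?_set_self', List.getElem?_eq_getElem hy]
    · simp [gN, h2, List.getElem?_set_ne (show y ≠ y' by omega), h3, h]
  · simp [gN, List.getElem?_set_ne (show x ≠ x' by omega), h1]

theorem shape_pvSet2 (board b : List (List Int)) (x y : Nat) (v : Int)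
    (hs : pvShape board b) :
    pvShape board (pvSet2 b (x : Int) (y : Int) v) := by
  obtain ⟨hl, hrows⟩ := hs
  cases h : b[x]? with
  | none => simpa [pvSet2, h] using ⟨hl, hrows⟩
  | some row =>
    rw [pvSet2_eq b x y v row h]
    refine ⟨by simpa using hl, fun z => ?_⟩
    by_cases hz : z = x
    · rw [hz, List.getElem?_set_self', h]
      have := hrows x
      rw [h] at this
      simpa using this
    · rw [List.getElem?_set_ne (show x ≠ z by omega)]
      exact hrows z

theorem pvInv_congr (board : List (List Int)) (P Q : Int → Int → Prop)
    (b : List (List Int))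
    (h : ∀ x y : Int, 0 ≤ x → x < (board.length : Int) → 0 ≤ y →
      y < (board.length : Int) → (P x y ↔ Q x y))
    (hb : pvInv board P b) : pvInv board Q b := by
  refine ⟨hb.1, fun x y hx1 hx2 hy1 hy2 => ?_⟩
  have h2 := hb.2 x y hx1 hx2 hy1 hy2
  have hiff := h x y hx1 hx2 hy1 hy2
  exact ⟨fun hc => h2.1 ⟨hc.1, hiff.mpr hc.2⟩,
         fun hc => h2.2 (fun hc' => hc ⟨hc'.1, hiff.mp hc'.2⟩)⟩

theorem step_inv (board : List (List Int)) (hpre : Pre_solution board)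
    (i j : Nat) (P : Int → Int → Prop) (d : Int × Int) (b : List (List Int))
    (hb : pvInv board P b) :
    pvInv board
      (fun x y => P x y ∨ (x = (i : Int) + d.1 ∧ y = (j : Int) + d.2))
      (pvStep board.length i j b d) := by
  unfold pvStep
  dsimp only
  set n : Nat := board.length with hn
  set x0 : Int := (i : Int) + d.1 with hx0
  set y0 : Int := (j : Int) + d.2 with hy0
  by_cases hA : 0 ≤ x0 ∧ x0 < (n : Int)
  · rw [if_neg (not_not_intro hA)]
    by_cases hB : 0 ≤ y0 ∧ y0 < (n : Int)
    · rw [if_neg (not_not_intro hB)]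
      have hb0 := hb.2 x0 y0 (by omega) (by omega) (by omega) (by omega)
      by_cases hC : pvGet2 b x0 y0 = 1
      · rw [if_pos hC]
        -- neighbour already holds value 1: its original value must be 1
        have horig : pvGet2 board x0 y0 = 1 := by
          by_contra hne
          by_cases hP : P x0 y0
          · rw [hb0.1 ⟨hne, hP⟩] at hC; omega
          · exact hne (by rw [← hb0.2 (fun hc => hP hc.2)]; exact hC)
        refine ⟨hb.1, fun x y hx1 hx2 hy1 hy2 => ?_⟩
        have h2 := hb.2 x y hx1 hx2 hy1 hy2
        by_cases hδ : x = x0 ∧ y = y0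
        · have he : pvGet2 board x y = 1 := by rw [hδ.1, hδ.2]; exact horig
          exact ⟨fun hc => absurd he hc.1, fun _ => h2.2 (fun hc => absurd he hc.1)⟩
        · exact ⟨fun hc => h2.1 ⟨hc.1, hc.2.resolve_right hδ⟩,
                 fun hc => h2.2 (fun hc' => hc ⟨hc'.1, Or.inl hc'.2⟩)⟩
      · rw [if_neg hC]
        -- mark the neighbour with -1
        have hl := hb.1.1
        have horig : pvGet2 board x0 y0 ≠ 1 := by
          intro h1
          exact hC (by rw [hb0.2 (fun hc => hc.1 h1)]; exact h1)
        set a : Nat := x0.toNat with ha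
        set c : Nat := y0.toNat with hc
        have hxa : x0 = (a : Int) := by omega
        have hyc : y0 = (c : Int) := by omega
        have haL : a < b.length := by omega
        have hrow : b[a]? = some b[a] := List.getElem?_eq_getElem haL
        have haB : a < board.length := by omega
        have hrowB : board[a]? = some board[a] := List.getElem?_eq_getElem haB
        have hlen : b[a].length = board[a].length := by
          have := hb.1.2 a
          rw [hrow, hrowB] at this
          simpa using this
        have hcL : c < b[a].length := by
          have : board.length ≤ board[a].length := hpre _ (List.getElem_mem haB)
          omega
        rw [hxa, hyc]
        refine ⟨shape_pvSet2 board b a c (-1) hb.1, fun x y hx1 hx2 hy1 hy2 => ?_⟩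
        have hg : pvGet2 (pvSet2 b (a : Int) (c : Int) (-1)) x y =
            if x.toNat = a ∧ y.toNat = c then -1 else pvGet2 b x y := by
          rw [gN_int _ x y hx1 hy1, gN_set b a c x.toNat y.toNat (-1) b[a] hrow hcL,
              ← gN_int b x y hx1 hy1]
        have h2 := hb.2 x y hx1 hx2 hy1 hy2
        by_cases hδ : x = x0 ∧ y = y0
        · have hδ' : x.toNat = a ∧ y.toNat = c := by omega
          have he : pvGet2 board x y ≠ 1 := by rw [hδ.1, hδ.2]; exact horig
          rw [hg, if_pos hδ']
          exact ⟨fun _ => rfl, fun hcon => absurd ⟨he, Or.inr (by omega)⟩ hcon⟩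
        · have hδ' : ¬ (x.toNat = a ∧ y.toNat = c) := by omega
          rw [hg, if_neg hδ']
          exact ⟨fun hcn => h2.1 ⟨hcn.1, hcn.2.resolve_right (by omega)⟩,
                 fun hcn => h2.2 (fun hc' => hcn ⟨hc'.1, Or.inl hc'.2⟩)⟩
    · rw [if_pos hB]
      refine pvInv_congr board P _ b (fun x y hx1 hx2 hy1 hy2 => ?_) hb
      constructor
      · exact Or.inl
      · rintro (hp | ⟨hxx, hyy⟩)
        · exact hp
        · exact absurd (⟨by omega, by omega⟩ : 0 ≤ y0 ∧ y0 < (n : Int)) hB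
  · rw [if_pos hA]
    refine pvInv_congr board P _ b (fun x y hx1 hx2 hy1 hy2 => ?_) hb
    constructor
    · exact Or.inl
    · rintro (hp | ⟨hxx, hyy⟩)
      · exact hp
      · exact absurd (⟨by omega, by omega⟩ : 0 ≤ x0 ∧ x0 < (n : Int)) hA

theorem fold_steps (board : List (List Int)) (hpre : Pre_solution board) (i j : Nat) :
    ∀ (ms : List (Int × Int)) (Q : Int → Int → Prop) (b : List (List Int)),
      pvInv board Q b →
      pvInv board (fun x y => Q x y ∨ pvNbr i j ms x y)
        (ms.foldl (pvStep board.length i j) b) := by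
  intro ms
  induction ms with
  | nil =>
    intro Q b hb
    refine pvInv_congr board Q _ b (fun x y _ _ _ _ => ?_) hb
    simp [pvNbr]
  | cons d ms ih =>
    intro Q b hb
    have h1 := step_inv board hpre i j Q d b hb
    have h2 := ih (fun x y => Q x y ∨ (x = (i : Int) + d.1 ∧ y = (j : Int) + d.2))
      (pvStep board.length i j b d) h1
    rw [List.foldl_cons]
    refine pvInv_congr board _ _ _ (fun x y _ _ _ _ => ?_) h2
    simp [pvNbr, or_assoc]

theorem marked_append_singleton (board : List (List Int)) (done : List (Nat × Nat))
    (i j : Nat) (x y : Int) :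
    pvMarked board (done ++ [(i, j)]) x y ↔
      pvMarked board done x y ∨
        (pvGet2 board (i : Int) (j : Int) = 1 ∧ pvNbr i j pvMove x y) := by
  constructor
  · rintro ⟨p, hp, hbomb, hnbr⟩
    rcases List.mem_append.mp hp with h | h
    · exact Or.inl ⟨p, h, hbomb, hnbr⟩
    · have hpij : p = (i, j) := by simpa using h
      subst hpij
      exact Or.inr ⟨hbomb, hnbr⟩
  · rintro (⟨p, hp, hbomb, hnbr⟩ | ⟨hbomb, hnbr⟩)
    · exact ⟨p, List.mem_append.mpr (Or.inl hp), hbomb, hnbr⟩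
    · exact ⟨(i, j), List.mem_append.mpr (Or.inr (by simp)), hbomb, hnbr⟩

theorem markFrom_inv (board : List (List Int)) (hpre : Pre_solution board)
    (done : List (Nat × Nat)) (i j : Nat)
    (hi : i < board.length) (hj : j < board.length) (b : List (List Int))
    (hb : pvInv board (pvMarked board done) b) :
    pvInv board (pvMarked board (done ++ [(i, j)]))
      (pvMarkFrom board.length b i j) := by
  have hb0 := hb.2 (i : Int) (j : Int) (by omega) (by omega) (by omega) (by omega)
  unfold pvMarkFrom
  by_cases hbomb : pvGet2 b (i : Int) (j : Int) = 1
  · rw [if_pos hbomb]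
    have horig : pvGet2 board (i : Int) (j : Int) = 1 := by
      by_contra hne
      by_cases hP : pvMarked board done (i : Int) (j : Int)
      · rw [hb0.1 ⟨hne, hP⟩] at hbomb; omega
      · exact hne (by rw [← hb0.2 (fun hc => hP hc.2)]; exact hbomb)
    have h2 := fold_steps board hpre i j pvMove (pvMarked board done) b hb
    refine pvInv_congr board _ _ _ (fun x y _ _ _ _ => ?_) h2
    rw [marked_append_singleton]
    constructor
    · rintro (h | h)
      · exact Or.inl h
      · exact Or.inr ⟨horig, h⟩
    · rintro (h | ⟨_, h⟩)
      · exact Or.inl h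
      · exact Or.inr h
  · rw [if_neg hbomb]
    have horig : pvGet2 board (i : Int) (j : Int) ≠ 1 := by
      intro h1
      exact hbomb (by rw [hb0.2 (fun hc => hc.1 h1)]; exact h1)
    refine pvInv_congr board _ _ _ (fun x y _ _ _ _ => ?_) hb
    rw [marked_append_singleton]
    constructor
    · exact Or.inl
    · rintro (h | ⟨hb1, _⟩)
      · exact h
      · exact absurd hb1 horig

theorem fold_pairs (board : List (List Int)) (hpre : Pre_solution board) :
    ∀ (ps : List (Nat × Nat)) (done : List (Nat × Nat)) (b : List (List Int)),
      (∀ p ∈ ps, p.1 < board.length ∧ p.2 < board.length) →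
      pvInv board (pvMarked board done) b →
      pvInv board (pvMarked board (done ++ ps))
        (ps.foldl (fun b p => pvMarkFrom board.length b p.1 p.2) b) := by
  intro ps
  induction ps with
  | nil => intro done b _ hb; simpa using hb
  | cons p ps ih =>
    intro done b hmem hb
    have h1 := markFrom_inv board hpre done p.1 p.2 (hmem p (by simp)).1
      (hmem p (by simp)).2 b hb
    have h2 := ih (done ++ [p]) _ (fun q hq => hmem q (by simp [hq])) (by simpa using h1)
    rw [List.foldl_cons]
    refine pvInv_congr board _ _ _ (fun x y _ _ _ _ => ?_) h2
    simp [List.append_assoc]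

theorem init_inv (board : List (List Int)) : pvInv board (pvMarked board []) board :=
  ⟨⟨rfl, fun _ => rfl⟩,
   fun x y _ _ _ _ =>
     ⟨fun hc => absurd hc.2 (by simp [pvMarked]), fun _ => rfl⟩⟩

theorem foldl_flatMap' {α β γ : Type} (l : List α) (g : α → List β) (f : γ → β → γ)
    (init : γ) :
    (l.flatMap g).foldl f init = l.foldl (fun acc a => (g a).foldl f acc) init := by
  induction l generalizing init with
  | nil => simp
  | cons a l ih => simp [List.foldl_append, ih]

theorem double_fold_eq {γ : Type} (n : Nat) (f : γ → Nat → Nat → γ) (init : γ) :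
    (List.range n).foldl
      (fun b i => (List.range n).foldl (fun b j => f b i j) b) init =
    (pvPairs n).foldl (fun b p => f b p.1 p.2) init := by
  rw [pvPairs, foldl_flatMap']
  simp [List.foldl_map]

theorem mem_pvPairs (n : Nat) (p : Nat × Nat) :
    p ∈ pvPairs n ↔ p.1 < n ∧ p.2 < n := by
  cases p
  simp [pvPairs]

theorem pvMove_facts (d : Int × Int) (hd : d ∈ pvMove) :
    d.1 ∈ pvDs ∧ d.2 ∈ pvDs ∧ ¬ (d.1 = 0 ∧ d.2 = 0) ∧
      (-d.1) ∈ pvDs ∧ (-d.2) ∈ pvDs := by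
  fin_cases hd <;> simp [pvDs]

theorem neg_mem_pvMove (dx dy : Int) (hdx : dx ∈ pvDs) (hdy : dy ∈ pvDs)
    (hne : ¬ (dx = 0 ∧ dy = 0)) : (-dx, -dy) ∈ pvMove := by
  fin_cases hdx <;> fin_cases hdy <;> simp_all [pvMove]

theorem hasNbr_iff (board : List (List Int)) (n i j : Nat) :
    pvHasBombNbr board n i j = true ↔
      ∃ dx ∈ pvDs, ∃ dy ∈ pvDs, ¬ (dx = 0 ∧ dy = 0) ∧
        (0 ≤ (i : Int) + dx ∧ (i : Int) + dx < (n : Int) ∧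
         0 ≤ (j : Int) + dy ∧ (j : Int) + dy < (n : Int)) ∧
        pvGet2 board ((i : Int) + dx) ((j : Int) + dy) = 1 := by
  simp [pvHasBombNbr, List.any_eq_true, and_assoc]
  constructor
  · rintro ⟨dx, h1, dy, h2, h3, h4⟩
    exact ⟨dx, h1, dy, h2, by tauto, h4⟩
  · rintro ⟨dx, h1, dy, h2, h3, h4⟩
    exact ⟨dx, h1, dy, h2, by tauto, h4⟩

theorem marked_iff (board : List (List Int)) (i j : Nat)
    (hi : i < board.length) (hj : j < board.length) :
    pvMarked board (pvPairs board.length) (i : Int) (j : Int) ↔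
      pvHasBombNbr board board.length i j = true := by
  rw [hasNbr_iff]
  constructor
  · rintro ⟨⟨a, c⟩, hp, hbomb, d, hd, hx, hy⟩
    rw [mem_pvPairs] at hp
    obtain ⟨h1, h2, h3, h4, h5⟩ := pvMove_facts d hd
    refine ⟨-d.1, h4, -d.2, h5, by omega, ⟨by omega, by omega, by omega, by omega⟩, ?_⟩
    rw [show ((i : Int) + -d.1) = (a : Int) by omega,
        show ((j : Int) + -d.2) = (c : Int) by omega]
    exact hbomb
  · rintro ⟨dx, hdx, dy, hdy, hne, ⟨b1, b2, b3, b4⟩, hget⟩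
    refine ⟨(((i : Int) + dx).toNat, ((j : Int) + dy).toNat),
      (mem_pvPairs _ _).mpr ⟨by omega, by omega⟩, ?_, (-dx, -dy),
      neg_mem_pvMove dx dy hdx hdy hne, by omega, by omega⟩
    rw [show ((((i : Int) + dx).toNat : Nat) : Int) = (i : Int) + dx by omega,
        show ((((j : Int) + dy).toNat : Nat) : Int) = (j : Int) + dy by omega]
    exact hget

theorem foldl_range_congr {γ : Type} :
    ∀ (n : Nat) (f g : γ → Nat → γ),
      (∀ i, i < n → ∀ s, f s i = g s i) →
      ∀ s0 : γ, (List.range n).foldl f s0 = (List.range n).foldl g s0 := by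
  intro n
  induction n with
  | zero => intro f g h s0; simp
  | succ m ih =>
    intro f g h s0
    rw [List.range_succ, List.foldl_append, List.foldl_append,
        ih f g (fun i hi s => h i (by omega) s) s0]
    simp [h m (by omega)]

theorem cell_iff (board : List (List Int)) (bf : List (List Int))
    (hinv : pvInv board (pvMarked board (pvPairs board.length)) bf)
    (i j : Nat) (hi : i < board.length) (hj : j < board.length) :
    (pvGet2 bf (i : Int) (j : Int) = 0) ↔
      (pvGet2 board (i : Int) (j : Int) = 0 ∧
        ¬ pvHasBombNbr board board.length i j = true) := by
  have h2 := hinv.2 (i : Int) (j : Int) (by omega) (by omega) (by omega) (by omega)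
  rw [← marked_iff board i j hi hj]
  by_cases hc : pvGet2 board (i : Int) (j : Int) ≠ 1 ∧
      pvMarked board (pvPairs board.length) (i : Int) (j : Int)
  · rw [h2.1 hc]
    constructor
    · intro h; omega
    · rintro ⟨_, hm⟩; exact absurd hc.2 hm
  · rw [h2.2 hc]
    constructor
    · intro h0
      refine ⟨h0, fun hm => hc ⟨by omega, hm⟩⟩
    · exact And.left

-- ===== VERDICT (by name: the statement is the Claim_ definition above) =====
theorem solution_spec : Claim_equal_solution := by
  intro board _hdom hpre
  unfold Spec_solution solution solution_alt
  dsimp only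
  rw [double_fold_eq board.length (fun b i j => pvMarkFrom board.length b i j) board]
  have hinv : pvInv board (pvMarked board (pvPairs board.length))
      ((pvPairs board.length).foldl
        (fun b p => pvMarkFrom board.length b p.1 p.2) board) := by
    have := fold_pairs board hpre (pvPairs board.length) [] board
      (fun p hp => (mem_pvPairs _ _).mp hp) (init_inv board)
    simpa using this
  refine foldl_range_congr board.length _ _ (fun i hi s => ?_) 0
  refine foldl_range_congr board.length _ _ (fun j hj s' => ?_) s
  exact if_congr (cell_iff board _ hinv i j hi hj) rfl rfl
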